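-- pv_equiv track=rewrite | github.com/HaKaTaHan/- | LV.1/나누어 떨어지는 숫자 배열.py | solution
-- ===== SOURCE A (Python) =====
-- import queue
--
-- def solution(arr, divisor):
--     answer = []
--     myQueue = queue.PriorityQueue()
--
--     for i in arr:
--         if i % divisor == 0:
--             myQueue.put(i)
--
--     if myQueue.qsize() == 0:
--         answer.append(-1)
--     else:
--         for i in range(myQueue.qsize()):
--             answer.append(myQueue.get())
--
--
--
--     return answer
-- ===== SOURCE B (Python) =====
-- def solution(arr, divisor):
--     vals = [i for i in arr if i % divisor == 0]
--     return sorted(vals) if vals else [-1]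
-- ===== Notes on version B (the rewrite author's own statement) =====
-- stated objective: idiomatic
-- what changed: Replaces the PriorityQueue (one heap-push per divisible element, then repeated min-extraction in a counted loop) with a single list-comprehension filter followed by one sorted() call and the [-1] sentinel for the empty case.
import Mathlib
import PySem

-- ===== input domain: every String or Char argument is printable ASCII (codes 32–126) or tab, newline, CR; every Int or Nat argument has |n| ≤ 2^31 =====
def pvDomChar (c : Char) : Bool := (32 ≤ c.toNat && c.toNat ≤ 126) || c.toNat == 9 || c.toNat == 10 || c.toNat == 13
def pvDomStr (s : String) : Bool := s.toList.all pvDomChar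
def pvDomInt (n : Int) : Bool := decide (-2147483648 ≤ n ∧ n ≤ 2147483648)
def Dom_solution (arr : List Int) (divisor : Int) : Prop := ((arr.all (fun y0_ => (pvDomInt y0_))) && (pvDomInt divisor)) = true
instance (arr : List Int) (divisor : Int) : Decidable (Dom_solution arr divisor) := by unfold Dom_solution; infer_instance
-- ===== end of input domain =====

-- B replaces A's PriorityQueue (push each divisible element, then a counted loop of min-extractions)
-- by a single filter followed by one library sort; same values on every divisor ≠ 0.

-- ===== PORT A =====
-- the counted extraction loop `for i in range(qsize): answer.append(myQueue.get())`,
-- written back-to-front: each step takes the queue's minimum and removes it (first occurrence)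
def pvDrain : Nat → List Int → List Int
  | 0, _ => []
  | n+1, q =>
    match PySem.List.min? q (fun x => x) with
    | none => []
    | some m => m :: pvDrain n (q.erase m)

def solution (arr : List Int) (divisor : Int) : List Int :=
  let myQueue := arr.foldl (fun acc i => if PySem.Int.mod i divisor = 0 then acc ++ [i] else acc) []
  if myQueue.length = 0 then [-1]
  else pvDrain myQueue.length myQueue

-- ===== PORT B =====
def solution_alt (arr : List Int) (divisor : Int) : List Int :=
  let vals := arr.filter (fun i => PySem.Int.mod i divisor == 0)
  if vals = [] then [-1] else PySem.List.sorted vals (fun x => x) false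

-- ===== PRECONDITION & SPEC =====
-- Pre_ excludes divisor = 0, on which Python's `i % divisor` raises ZeroDivisionError.
def Pre_solution (arr : List Int) (divisor : Int) : Prop := divisor ≠ 0
instance (arr : List Int) (divisor : Int) : Decidable (Pre_solution arr divisor) := by unfold Pre_solution; infer_instance
def pvWitness_solution : List Int × Int := ([5, 9, 7, 10], 5)

def Spec_solution (arr : List Int) (divisor : Int) (out : List Int) : Prop := out = solution_alt arr divisor
instance (arr : List Int) (divisor : Int) (out : List Int) : Decidable (Spec_solution arr divisor out) := by unfold Spec_solution; infer_instance

-- ===== CLAIM (what is proved, stated in full; the proofs are below) =====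
def Claim_equal_solution : Prop := ∀ (arr : List Int) (divisor : Int), Dom_solution arr divisor → Pre_solution arr divisor → Spec_solution arr divisor (solution arr divisor)

-- ===== LEMMAS AND PROOFS =====

theorem pvDrain_succ (k : Nat) (q : List Int) (m : Int)
    (hm : PySem.List.min? q (fun x => x) = some m) :
    pvDrain (k+1) q = m :: pvDrain k (q.erase m) := by
  rw [pvDrain, hm]

theorem pvDrain_perm (q : List Int) : (pvDrain q.length q).Perm q := by
  induction hn : q.length using Nat.strong_induction_on generalizing q with
  | _ n ih =>
    cases n with
    | zero =>
      have hq : q = [] := List.length_eq_zero_iff.mp hn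
      subst hq
      simp [pvDrain]
    | succ k =>
      have hne : q ≠ [] := by intro h; simp [h] at hn
      obtain ⟨m, hm⟩ : ∃ m, PySem.List.min? q (fun x => x) = some m := by
        cases h : PySem.List.min? q (fun x => x) with
        | none => exact absurd ((PySem.List.min?_eq_none_iff q _).mp h) hne
        | some m => exact ⟨m, rfl⟩
      have hmem : m ∈ q := PySem.List.min?_mem hm
      have hlen : (q.erase m).length = k := by
        have := List.length_erase_of_mem hmem; omega
      have ihp := ih k (by omega) (q.erase m) hlen
      rw [pvDrain_succ k q m hm]
      exact ((ihp.cons m).trans (List.perm_cons_erase hmem).symm)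

theorem pvDrain_pairwise (q : List Int) : (pvDrain q.length q).Pairwise (· ≤ ·) := by
  induction hn : q.length using Nat.strong_induction_on generalizing q with
  | _ n ih =>
    cases n with
    | zero =>
      have hq : q = [] := List.length_eq_zero_iff.mp hn
      subst hq
      simp [pvDrain]
    | succ k =>
      have hne : q ≠ [] := by intro h; simp [h] at hn
      obtain ⟨m, hm⟩ : ∃ m, PySem.List.min? q (fun x => x) = some m := by
        cases h : PySem.List.min? q (fun x => x) with
        | none => exact absurd ((PySem.List.min?_eq_none_iff q _).mp h) hne
        | some m => exact ⟨m, rfl⟩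
      have hmem : m ∈ q := PySem.List.min?_mem hm
      have hlen : (q.erase m).length = k := by
        have := List.length_erase_of_mem hmem; omega
      rw [pvDrain_succ k q m hm]
      refine List.pairwise_cons.mpr ⟨?_, ih k (by omega) _ hlen⟩
      intro y hy
      have hy' : y ∈ q.erase m := (pvDrain_perm (q.erase m)).mem_iff.mp (by rw [hlen]; exact hy)
      exact PySem.List.min?_isMin hm y (List.mem_of_mem_erase hy')

theorem pvDrain_eq_sorted (q : List Int) :
    pvDrain q.length q = PySem.List.sorted q (fun x => x) false :=
  (PySem.List.sorted_id_eq_of_perm_of_pairwise q (pvDrain q.length q)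
    (pvDrain_perm q) (pvDrain_pairwise q)).symm

-- ===== VERDICT (by name: the statement is the Claim_ definition above) =====
theorem solution_spec : Claim_equal_solution := by
  intro arr divisor _ _
  unfold Spec_solution solution solution_alt
  simp only []
  rw [PySem.List.foldl_append_ite_eq_filter]
  have hfe : (arr.filter (fun i => decide (PySem.Int.mod i divisor = 0)))
      = (arr.filter (fun i => PySem.Int.mod i divisor == 0)) := by
    rfl
  simp only [List.nil_append, hfe]
  by_cases h : (arr.filter (fun i => PySem.Int.mod i divisor == 0)) = []
  · simp [h]
  · rw [if_neg (by simpa using h), if_neg h, pvDrain_eq_sorted]
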